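-- pv_equiv track=rewrite | github.com/JANENAMMMM/Python-day4-HW | 모의고사_2.py | solution
-- ===== SOURCE A (Python) =====
-- def solution(answers):
--     p1=[1,2,3,4,5]
--     p2=[2,1,2,3,2,4,2,5]
--     p3=[3,3,1,1,2,2,4,4,5,5]
--     scores=[0,0,0]
--     result=[]
--     for index,answer in enumerate(answers):
--         if answer==p1[index%len(p1)]:
--             scores[0]+=1
--         if answer==p2[index%len(p2)]:
--             scores[1]+=1
--         if answer==p3[index%len(p3)]:
--             scores[2]+=1
--     for index,score in enumerate(scores):
--         if score==max(scores):
--             result.append(index+1)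
--     return result
-- ===== SOURCE B (Python) =====
-- def solution(answers):
--     patterns = [[1, 2, 3, 4, 5],
--                 [2, 1, 2, 3, 2, 4, 2, 5],
--                 [3, 3, 1, 1, 2, 2, 4, 4, 5, 5]]
--     L = 40  # lcm of the pattern lengths: all three patterns repeat with period 40
--     freq = {}
--     for i, a in enumerate(answers):
--         key = (i % L, a)
--         freq[key] = freq.get(key, 0) + 1
--     scores = [sum(freq.get((r, p[r % len(p)]), 0) for r in range(L))
--               for p in patterns]
--     best = max(scores)
--     return [k + 1 for k, s in enumerate(scores) if s == best]
-- ===== Notes on version B (the rewrite author's own statement) =====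
-- stated objective: alternative
-- what changed: B builds a frequency dictionary keyed by (index mod 40, answer) in one pass (40 = lcm of the pattern period lengths) and then scores each pattern with 40 table lookups, instead of A's fused scan comparing every answer against all three patterns element by element.
import Mathlib
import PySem

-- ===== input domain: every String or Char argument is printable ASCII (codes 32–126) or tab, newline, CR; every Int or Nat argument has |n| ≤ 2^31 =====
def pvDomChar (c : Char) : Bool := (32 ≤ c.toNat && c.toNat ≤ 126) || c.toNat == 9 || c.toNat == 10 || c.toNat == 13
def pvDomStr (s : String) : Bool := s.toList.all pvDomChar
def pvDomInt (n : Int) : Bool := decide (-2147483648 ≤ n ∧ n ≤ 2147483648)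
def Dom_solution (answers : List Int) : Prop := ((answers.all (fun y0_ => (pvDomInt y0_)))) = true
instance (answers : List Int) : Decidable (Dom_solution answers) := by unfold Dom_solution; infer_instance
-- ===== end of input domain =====

-- B replaces A's fused per-answer three-way comparison scan with a frequency dictionary
-- keyed by (index mod 40, answer) built in one pass (40 = lcm of the pattern periods);
-- each pattern is then scored by 40 table lookups (alternative decomposition, same value).

-- ===== PORT A =====
-- p[index % len(p)] is always in range, so pyGetD is exact here.
def solution (answers : List Int) : List Int :=
  let p1 : List Int := [1, 2, 3, 4, 5]
  let p2 : List Int := [2, 1, 2, 3, 2, 4, 2, 5]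
  let p3 : List Int := [3, 3, 1, 1, 2, 2, 4, 4, 5, 5]
  let scores :=
    (PySem.List.enumerate answers 0).foldl
      (fun (s : Int × Int × Int) (ia : Int × Int) =>
        let s := if ia.2 == PySem.List.pyGetD p1 (PySem.Int.mod ia.1 (p1.length : Int)) 0 then (s.1 + 1, s.2.1, s.2.2) else s
        let s := if ia.2 == PySem.List.pyGetD p2 (PySem.Int.mod ia.1 (p2.length : Int)) 0 then (s.1, s.2.1 + 1, s.2.2) else s
        if ia.2 == PySem.List.pyGetD p3 (PySem.Int.mod ia.1 (p3.length : Int)) 0 then (s.1, s.2.1, s.2.2 + 1) else s)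
      (0, 0, 0)
  let scoresL : List Int := [scores.1, scores.2.1, scores.2.2]
  (PySem.List.enumerate scoresL 0).foldl
    (fun r (is : Int × Int) =>
      if is.2 == (PySem.List.max? scoresL (fun y => y)).getD 0 then r ++ [is.1 + 1] else r)
    []

-- ===== PORT B =====
-- freq[key] = freq.get(key, 0) + 1; p[r % len(p)] is always in range, so pyGetD is exact.
def solution_alt (answers : List Int) : List Int :=
  let patterns : List (List Int) :=
    [[1, 2, 3, 4, 5], [2, 1, 2, 3, 2, 4, 2, 5], [3, 3, 1, 1, 2, 2, 4, 4, 5, 5]]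
  let L : Int := 40
  let freq : PySem.Dict (Int × Int) Int :=
    (PySem.List.enumerate answers 0).foldl
      (fun d ia =>
        let key := (PySem.Int.mod ia.1 L, ia.2)
        d.insert key (d.getD key 0 + 1))
      PySem.Dict.empty
  let scores := patterns.map (fun p =>
    ((PySem.List.pyRange 0 L 1).map
      (fun r => freq.getD (r, PySem.List.pyGetD p (PySem.Int.mod r (p.length : Int)) 0) 0)).sum)
  let best := (PySem.List.max? scores (fun y => y)).getD 0
  ((PySem.List.enumerate scores 0).filter (fun ks => ks.2 == best)).map (fun ks => ks.1 + 1)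

-- ===== PRECONDITION & SPEC =====
def Spec_solution (answers : List Int) (out : List Int) : Prop := out = solution_alt answers
instance (answers : List Int) (out : List Int) : Decidable (Spec_solution answers out) := by unfold Spec_solution; infer_instance

-- ===== CLAIM (what is proved, stated in full; the proofs are below) =====
def Claim_equal_solution : Prop := ∀ (answers : List Int), Dom_solution answers → Spec_solution answers (solution answers)

-- ===== LEMMAS AND PROOFS =====

-- A loop with three independent conditional counters is three independent counts.
theorem foldl_three_counters (L : List (Int × Int)) (q1 q2 q3 : Int × Int → Bool)
    (a b c : Int) :
    L.foldl
      (fun (s : Int × Int × Int) (ia : Int × Int) =>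
        let s := if q1 ia then (s.1 + 1, s.2.1, s.2.2) else s
        let s := if q2 ia then (s.1, s.2.1 + 1, s.2.2) else s
        if q3 ia then (s.1, s.2.1, s.2.2 + 1) else s)
      (a, b, c)
    = (a + (L.countP q1 : Int), b + (L.countP q2 : Int), c + (L.countP q3 : Int)) := by
  induction L generalizing a b c with
  | nil => simp
  | cons x t ih =>
    simp only [List.foldl_cons, List.countP_cons]
    by_cases h1 : q1 x <;> by_cases h2 : q2 x <;> by_cases h3 : q3 x <;>
      simp [h1, h2, h3, ih] <;> omega

-- range-n sum of an equality indicator at a key with fst ≥ n is 0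
theorem sum_ind_range_zero (V : Int → Int) (k : Int × Int) (n : Nat) (hn : (n : Int) ≤ k.1) :
    ((List.range n).map (fun (r : Nat) => if ((r : Int), V (r : Int)) = k then (1 : Int) else 0)).sum = 0 := by
  induction n with
  | zero => simp
  | succ m ih =>
    rw [List.range_succ]
    have h1 : ((m : Int), V (m : Int)) ≠ k := by
      intro h
      have : k.1 = (m : Int) := by rw [← h]
      push_cast at hn; omega
    have h2 : (m : Int) ≤ k.1 := by push_cast at hn ⊢; omega
    simp [ih h2, h1]

-- range-n sum of an equality indicator with fst inside the range is the single indicator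
theorem sum_ind_range (V : Int → Int) (k : Int × Int) (n : Nat)
    (h0 : 0 ≤ k.1) (hn : k.1 < (n : Int)) :
    ((List.range n).map (fun (r : Nat) => if ((r : Int), V (r : Int)) = k then (1 : Int) else 0)).sum
      = if k.2 = V k.1 then 1 else 0 := by
  induction n with
  | zero => omega
  | succ m ih =>
    rw [List.range_succ]
    by_cases hm : k.1 = (m : Int)
    · rw [List.map_append, List.sum_append, sum_ind_range_zero V k m (by omega)]
      have : (((m : Int), V (m : Int)) = k) ↔ (k.2 = V k.1) := by
        constructor
        · intro h; rw [← h]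
        · intro h; rw [Prod.ext_iff]; exact ⟨hm.symm, by rw [h, hm]⟩
      simp only [List.map_cons, List.map_nil,
        List.sum_cons, List.sum_nil]
      rw [zero_add, add_zero]
      split_ifs with ha hb hb
      · rfl
      · exact absurd (this.mp ha) hb
      · exact absurd (this.mpr hb) ha
      · rfl
    · have hlt : k.1 < (m : Int) := by push_cast at hn; omega
      have hne : ((m : Int), V (m : Int)) ≠ k := by
        intro h; rw [← h] at hm; simp at hm
      simp [List.map_append, ih hlt, hne]

-- summing counts of (r, V r) over r < 40 in the keyed list counts the matching pairs
theorem sum_count_keyed (l : List (Int × Int)) (V : Int → Int)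
    (h : ∀ x ∈ l, 0 ≤ x.1) :
    ((List.range 40).map
      (fun (r : Nat) => ((((l.map (fun ia => (PySem.Int.mod ia.1 40, ia.2))).count ((r : Int), V (r : Int))) : Nat) : Int))).sum
    = ((l.countP (fun ia => ia.2 == V (PySem.Int.mod ia.1 40)) : Nat) : Int) := by
  induction l with
  | nil => simp
  | cons x t ih =>
    have hx : 0 ≤ x.1 := h x (List.mem_cons_self ..)
    have ht : ∀ y ∈ t, 0 ≤ y.1 := fun y hy => h y (List.mem_cons_of_mem _ hy)
    have hkey0 : 0 ≤ PySem.Int.mod x.1 40 := PySem.Int.mod_nonneg x.1 (by norm_num)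
    have hkey40 : PySem.Int.mod x.1 40 < 40 := PySem.Int.mod_lt x.1 (by norm_num)
    have hsplit : ∀ r : Nat,
        (((x :: t).map (fun ia => (PySem.Int.mod ia.1 40, ia.2))).count ((r : Int), V (r : Int)) : Int)
        = ((t.map (fun ia => (PySem.Int.mod ia.1 40, ia.2))).count ((r : Int), V (r : Int)) : Int)
          + (if ((r : Int), V (r : Int)) = (PySem.Int.mod x.1 40, x.2) then (1 : Int) else 0) := by
      intro (r : Nat)
      rw [List.map_cons, List.count_cons]
      by_cases hh : ((r : Int), V (r : Int)) = (PySem.Int.mod x.1 40, x.2)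
      · have hb : ((PySem.Int.mod x.1 40, x.2) == ((r : Int), V (r : Int))) = true := by
          rw [beq_iff_eq, hh]
        simp [hh]
      · have hb : ((PySem.Int.mod x.1 40, x.2) == ((r : Int), V (r : Int))) = false := by
          rw [beq_eq_false_iff_ne]; exact fun h' => hh h'.symm
        push_cast [hb]
        rw [if_neg hh]
    have hmaps :
        ((List.range 40).map (fun (r : Nat) => (((x :: t).map (fun ia => (PySem.Int.mod ia.1 40, ia.2))).count ((r : Int), V (r : Int)) : Int)))
        = ((List.range 40).map (fun (r : Nat) =>
            ((t.map (fun ia => (PySem.Int.mod ia.1 40, ia.2))).count ((r : Int), V (r : Int)) : Int)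
            + (if ((r : Int), V (r : Int)) = (PySem.Int.mod x.1 40, x.2) then (1 : Int) else 0))) :=
      List.map_congr_left (fun (r : Nat) _ => hsplit r)
    rw [hmaps, PySem.List.sum_map_add_int, ih ht,
      sum_ind_range V (PySem.Int.mod x.1 40, x.2) 40 hkey0 (by exact_mod_cast hkey40),
      List.countP_cons]
    by_cases hc : x.2 = V (PySem.Int.mod x.1 40) <;> simp [hc]

-- the explicit 40-term Python range
theorem pyRange_forty : PySem.List.pyRange 0 40 1 = (List.range 40).map (fun k => (k : Int)) := by
  have := PySem.List.pyRange_zero_natCast 40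
  simpa using this

-- score of one pattern: B's 40 table lookups equal A's direct count,
-- for a pattern whose length divides 40
theorem pattern_score (answers : List Int) (p : List Int)
    (hdvd : ((p.length : Int)) ∣ 40) (hpos : 0 < p.length) :
    ((PySem.List.pyRange 0 40 1).map
      (fun (r : Int) => (PySem.Dict.counter
          ((PySem.List.enumerate answers 0).map (fun ia => (PySem.Int.mod ia.1 40, ia.2)))).getD
        (r, PySem.List.pyGetD p (PySem.Int.mod r (p.length : Int)) 0) 0)).sum
    = (((PySem.List.enumerate answers 0).countP
        (fun ia => ia.2 == PySem.List.pyGetD p (PySem.Int.mod ia.1 (p.length : Int)) 0) : Nat) : Int) := by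
  have hnn : ∀ x ∈ PySem.List.enumerate answers 0, 0 ≤ x.1 := by
    intro x hx
    rcases (PySem.List.mem_enumerate_iff answers 0 x).mp hx with ⟨k, hk, rfl⟩
    simp
  rw [pyRange_forty, List.map_map]
  have hV := sum_count_keyed (PySem.List.enumerate answers 0)
    (fun (r : Int) => PySem.List.pyGetD p (PySem.Int.mod r (p.length : Int)) 0) hnn
  have hgd : ∀ r : Nat,
      (PySem.Dict.counter
          ((PySem.List.enumerate answers 0).map (fun ia => (PySem.Int.mod ia.1 40, ia.2)))).getD
        ((r : Int), PySem.List.pyGetD p (PySem.Int.mod (r : Int) (p.length : Int)) 0) 0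
      = (((PySem.List.enumerate answers 0).map (fun ia => (PySem.Int.mod ia.1 40, ia.2))).count
          ((r : Int), PySem.List.pyGetD p (PySem.Int.mod (r : Int) (p.length : Int)) 0) : Int) := by
    intro (r : Nat)
    exact PySem.Dict.getD_counter _ _
  calc ((List.range 40).map
        (fun (r : Nat) => (PySem.Dict.counter
            ((PySem.List.enumerate answers 0).map (fun ia => (PySem.Int.mod ia.1 40, ia.2)))).getD
          ((r : Int), PySem.List.pyGetD p (PySem.Int.mod (r : Int) (p.length : Int)) 0) 0)).sum
      = ((List.range 40).map
        (fun (r : Nat) => (((PySem.List.enumerate answers 0).map (fun ia => (PySem.Int.mod ia.1 40, ia.2))).count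
          ((r : Int), PySem.List.pyGetD p (PySem.Int.mod (r : Int) (p.length : Int)) 0) : Int))).sum := by
        exact congrArg List.sum (List.map_congr_left (fun (r : Nat) _ => hgd r))
    _ = (((PySem.List.enumerate answers 0).countP
          (fun ia => ia.2 ==
            PySem.List.pyGetD p (PySem.Int.mod (PySem.Int.mod ia.1 40) (p.length : Int)) 0) : Nat) : Int) := hV
    _ = (((PySem.List.enumerate answers 0).countP
          (fun ia => ia.2 == PySem.List.pyGetD p (PySem.Int.mod ia.1 (p.length : Int)) 0) : Nat) : Int) := by
        congr 1
        apply List.countP_congr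
        intro x hx
        have hx0 : 0 ≤ x.1 := hnn x hx
        have hmm : PySem.Int.mod (PySem.Int.mod x.1 40) (p.length : Int) = PySem.Int.mod x.1 (p.length : Int) := by
          rw [PySem.Int.mod_eq_emod_of_pos (a := x.1) (by omega : (0:Int) < 40),
            PySem.Int.mod_eq_emod_of_pos (by exact_mod_cast hpos),
            PySem.Int.mod_eq_emod_of_pos (by exact_mod_cast hpos),
            Int.emod_emod_of_dvd _ hdvd]
        rw [hmm]

-- ===== VERDICT (by name: the statement is the Claim_ definition above) =====
theorem solution_spec : Claim_equal_solution := by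
  intro answers _
  unfold Spec_solution solution solution_alt
  have hfreq : (PySem.List.enumerate answers 0).foldl
      (fun (d : PySem.Dict (Int × Int) Int) (ia : Int × Int) =>
        let key := (PySem.Int.mod ia.1 40, ia.2)
        d.insert key (d.getD key 0 + 1)) PySem.Dict.empty
      = PySem.Dict.counter ((PySem.List.enumerate answers 0).map (fun ia => (PySem.Int.mod ia.1 40, ia.2))) := by
    rw [← PySem.Dict.foldl_insert_getD_add_one_eq_counter, List.foldl_map]
  simp only [List.map]
  rw [foldl_three_counters, hfreq,
    pattern_score answers [1, 2, 3, 4, 5] (by norm_num) (by norm_num),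
    pattern_score answers [2, 1, 2, 3, 2, 4, 2, 5] (by norm_num) (by norm_num),
    pattern_score answers [3, 3, 1, 1, 2, 2, 4, 4, 5, 5] (by norm_num) (by norm_num),
    PySem.List.foldl_append_if]
  simp
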